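-- pv_equiv track=rewrite | github.com/Mahdi123408/quxland-backend | my_methods/creators.py | change_file_name
-- ===== SOURCE A (Python) =====
-- def change_file_name(file_name, new_file_name):
--     find = False
--     b = 0
--     ft = ''
--     o_name = ''
--     while b < len(file_name):
--         if find:
--             ft += file_name[b]
--         elif file_name[b] == '.':
--             find = True
--         else:
--             o_name += file_name[b]
--         b += 1
--     return f'{o_name}{new_file_name}.{ft}'
-- ===== SOURCE B (Python) =====
-- def change_file_name(file_name, new_file_name):
--     head, _, tail = file_name.partition('.')
--     return f'{head}{new_file_name}.{tail}'
-- ===== Notes on version B (the rewrite author's own statement) =====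
-- stated objective: simpler
-- what changed: Replaces the index-based while loop with a found-flag and two character-by-character string accumulators by a single str.partition('.') split at the first dot plus one f-string.
import Mathlib
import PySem

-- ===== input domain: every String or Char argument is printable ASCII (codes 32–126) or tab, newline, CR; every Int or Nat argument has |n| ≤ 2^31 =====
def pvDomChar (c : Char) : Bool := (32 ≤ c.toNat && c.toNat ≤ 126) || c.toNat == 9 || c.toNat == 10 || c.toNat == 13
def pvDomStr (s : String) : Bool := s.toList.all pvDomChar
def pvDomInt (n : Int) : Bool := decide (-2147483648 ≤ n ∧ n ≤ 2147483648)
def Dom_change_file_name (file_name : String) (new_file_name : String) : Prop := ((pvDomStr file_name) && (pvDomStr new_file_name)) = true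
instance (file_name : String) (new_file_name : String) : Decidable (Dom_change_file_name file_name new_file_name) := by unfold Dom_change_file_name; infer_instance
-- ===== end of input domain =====

-- B replaces A's index loop with a found-flag by a single split at the first dot (Python's str.partition); objective: simpler.

-- ===== PORT A =====
-- the while loop over indices, transcribed as structural recursion over the characters,
-- with the same state (find, ft, o_name); '+=' on strings becomes '++ [c]'
def change_file_name_loop : List Char → Bool → List Char → List Char → (List Char × List Char)
  | [], _, ft, o => (o, ft)
  | c :: rest, find, ft, o =>
    if find then change_file_name_loop rest true (ft ++ [c]) o
    else if c = '.' then change_file_name_loop rest true ft o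
    else change_file_name_loop rest find ft (o ++ [c])

def change_file_name (file_name : String) (new_file_name : String) : String :=
  let r := change_file_name_loop file_name.toList false [] []
  String.mk (r.1 ++ new_file_name.toList ++ '.' :: r.2)

-- ===== PORT B =====
-- hand port of str.partition('.'): head = chars before the first '.', tail = chars after it
-- (no dot: head = whole string, tail = ''); exact for the one-character separator '.'
def change_file_name_alt (file_name : String) (new_file_name : String) : String :=
  let cs := file_name.toList
  let head := cs.takeWhile (· ≠ '.')
  let tail := (cs.dropWhile (· ≠ '.')).drop 1
  String.mk (head ++ new_file_name.toList ++ '.' :: tail)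

-- ===== PRECONDITION & SPEC =====
def Spec_change_file_name (file_name : String) (new_file_name : String) (out : String) : Prop := out = change_file_name_alt file_name new_file_name
instance (file_name : String) (new_file_name : String) (out : String) : Decidable (Spec_change_file_name file_name new_file_name out) := by unfold Spec_change_file_name; infer_instance

-- ===== CLAIM (what is proved, stated in full; the proofs are below) =====
def Claim_equal_change_file_name : Prop := ∀ (file_name : String) (new_file_name : String), Dom_change_file_name file_name new_file_name → Spec_change_file_name file_name new_file_name (change_file_name file_name new_file_name)

-- ===== LEMMAS AND PROOFS =====

-- after the dot is found, the loop just appends the rest to ft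
theorem change_file_name_loop_true (cs ft o : List Char) :
    change_file_name_loop cs true ft o = (o, ft ++ cs) := by
  induction cs generalizing ft with
  | nil => simp [change_file_name_loop]
  | cons c rest ih => simp [change_file_name_loop, ih]

theorem change_file_name_loop_false (cs ft o : List Char) :
    change_file_name_loop cs false ft o =
      (o ++ cs.takeWhile (· ≠ '.'), ft ++ (cs.dropWhile (· ≠ '.')).drop 1) := by
  induction cs generalizing o with
  | nil => simp [change_file_name_loop]
  | cons c rest ih =>
    by_cases hc : c = '.'
    · simp [change_file_name_loop, hc, change_file_name_loop_true]
    · simp [change_file_name_loop, hc, ih]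

-- ===== VERDICT (by name: the statement is the Claim_ definition above) =====
theorem change_file_name_spec : Claim_equal_change_file_name := by
  intro f n _
  unfold Spec_change_file_name change_file_name change_file_name_alt
  simp [change_file_name_loop_false]
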